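-- pv_equiv track=rewrite | github.com/phdotexe/artificial-intelligence-code | sec_1_group_7_mastermind/ai_recursive_mastermind.py | partition_by_feedback
-- ===== SOURCE A (Python) =====
-- from typing import Dict, List, Tuple
--
-- def calculate_feedback(
--     guess: Tuple[str, ...], secret: Tuple[str, ...]
-- ) -> Tuple[int, int]:
--     black_pegs = 0
--     guess_remaining = []
--     secret_remaining = []
--
--     for g, s in zip(guess, secret):
--         if g == s:
--             black_pegs += 1
--         else:
--             guess_remaining.append(g)
--             secret_remaining.append(s)
--     white_pegs = 0
--     for g in guess_remaining:
--         if g in secret_remaining: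
--             white_pegs += 1
--             secret_remaining.remove(g)
--
--     return (black_pegs, white_pegs)
--
-- def partition_by_feedback(
--     guess: Tuple[str, ...], possible_codes: List[Tuple[str, ...]]
-- ) -> Dict[Tuple[int, int], List[Tuple[str, ...]]]:
--
--     partitions: Dict[Tuple[int, int], List[Tuple[str, ...]]] = {}
--
--     for code in possible_codes:
--         feedback = calculate_feedback(guess, code)
--         if feedback not in partitions:
--             partitions[feedback] = []
--         partitions[feedback].append(code)
--
--     return partitions
-- ===== SOURCE B (Python) =====
-- from typing import Dict, List, Tuple
--
--
-- def _feedback(guess, secret):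
--     n = min(len(guess), len(secret))
--     black = sum(g == s for g, s in zip(guess, secret))
--     gcnt = {}
--     for g in guess[:n]:
--         gcnt[g] = gcnt.get(g, 0) + 1
--     scnt = {}
--     for s in secret[:n]:
--         scnt[s] = scnt.get(s, 0) + 1
--     total = sum(min(k, scnt.get(c, 0)) for c, k in gcnt.items())
--     return (black, total - black)
--
--
-- def partition_by_feedback(
--     guess: Tuple[str, ...], possible_codes: List[Tuple[str, ...]]
-- ) -> Dict[Tuple[int, int], List[Tuple[str, ...]]]:
--     partitions: Dict[Tuple[int, int], List[Tuple[str, ...]]] = {}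
--     for code in possible_codes:
--         partitions.setdefault(_feedback(guess, code), []).append(code)
--     return partitions
-- ===== Notes on version B (the rewrite author's own statement) =====
-- stated objective: faster
-- what changed: calculate_feedback's quadratic remainder-scan (build guess/secret remainder lists, then for each leftover guess colour scan and list.remove from the secret remainder) is replaced by frequency tables: count black pegs positionally over the zip, build per-colour count dicts over the zipped prefixes, and return white as (sum of per-colour minima) minus black; the partition loop keeps the dict grouping via setdefault.
import Mathlib
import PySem

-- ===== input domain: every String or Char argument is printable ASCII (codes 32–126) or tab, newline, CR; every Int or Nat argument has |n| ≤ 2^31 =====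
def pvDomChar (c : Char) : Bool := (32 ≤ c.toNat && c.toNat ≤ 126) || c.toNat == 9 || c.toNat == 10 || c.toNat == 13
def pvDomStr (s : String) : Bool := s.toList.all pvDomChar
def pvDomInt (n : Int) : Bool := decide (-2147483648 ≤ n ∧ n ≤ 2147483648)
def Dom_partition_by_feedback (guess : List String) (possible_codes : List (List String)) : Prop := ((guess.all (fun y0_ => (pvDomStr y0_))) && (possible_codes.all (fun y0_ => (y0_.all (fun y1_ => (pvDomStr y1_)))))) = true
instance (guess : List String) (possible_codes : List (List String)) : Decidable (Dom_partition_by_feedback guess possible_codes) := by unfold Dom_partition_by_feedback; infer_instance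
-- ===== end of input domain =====

-- B replaces A's quadratic remainder-scan white-peg count by per-colour frequency
-- tables (black, then sum of per-colour minima minus black); partition loop kept.

-- ===== PORT A =====
-- calculate_feedback: zip loop collecting black pegs and the two remainder lists,
-- then the 'if g in secret_remaining: remove' loop (list.remove = PySem.List.remove?,
-- guarded by the membership test exactly as in the Python).
def pvCalcA (guess secret : List String) : Int × Int :=
  let st : Int × List String × List String :=
    (guess.zip secret).foldl
      (fun acc gs =>
        if gs.1 = gs.2 then (acc.1 + 1, acc.2.1, acc.2.2)
        else (acc.1, acc.2.1 ++ [gs.1], acc.2.2 ++ [gs.2]))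
      (0, [], [])
  let w : Int × List String :=
    st.2.1.foldl
      (fun acc g =>
        if g ∈ acc.2 then (acc.1 + 1, (PySem.List.remove? acc.2 g).getD acc.2)
        else acc)
      (0, st.2.2)
  (st.1, w.1)

def partition_by_feedback (guess : List String) (possible_codes : List (List String)) : List (Int × Int × List (List String)) :=
  let d : PySem.Dict (Int × Int) (List (List String)) :=
    possible_codes.foldl
      (fun d code =>
        let fb := pvCalcA guess code
        let d1 := if d.contains fb = false then d.insert fb [] else d
        d1.modify fb [] (· ++ [code]))
      PySem.Dict.empty
  d.items.map (fun p => (p.1.1, p.1.2, p.2))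

-- ===== PORT B =====
-- _feedback: positional black count, then counting dicts over the zipped prefixes
-- (guess[:n] = List.take n, n = min of the lengths, n ≥ 0) and total of per-colour minima.
def pvFeedbackB (guess secret : List String) : Int × Int :=
  let n := min guess.length secret.length
  let black : Int := ((guess.zip secret).map (fun gs => if gs.1 = gs.2 then (1 : Int) else 0)).sum
  let gc : PySem.Dict String Int :=
    (guess.take n).foldl (fun d g => d.insert g (d.getD g 0 + 1)) PySem.Dict.empty
  let sc : PySem.Dict String Int :=
    (secret.take n).foldl (fun d s => d.insert s (d.getD s 0 + 1)) PySem.Dict.empty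
  let total : Int := (gc.items.map (fun ck => min ck.2 (sc.getD ck.1 0))).sum
  (black, total - black)

def partition_by_feedback_alt (guess : List String) (possible_codes : List (List String)) : List (Int × Int × List (List String)) :=
  let d : PySem.Dict (Int × Int) (List (List String)) :=
    possible_codes.foldl
      (fun d code =>
        let fb := pvFeedbackB guess code
        (d.setdefault fb []).modify fb [] (· ++ [code]))
      PySem.Dict.empty
  d.items.map (fun p => (p.1.1, p.1.2, p.2))

-- ===== PRECONDITION & SPEC =====
def Spec_partition_by_feedback (guess : List String) (possible_codes : List (List String)) (out : List (Int × Int × List (List String))) : Prop := out = partition_by_feedback_alt guess possible_codes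
instance (guess : List String) (possible_codes : List (List String)) (out : List (Int × Int × List (List String))) : Decidable (Spec_partition_by_feedback guess possible_codes out) := by unfold Spec_partition_by_feedback; infer_instance

-- ===== CLAIM (what is proved, stated in full; the proofs are below) =====
def Claim_equal_partition_by_feedback : Prop := ∀ (guess : List String) (possible_codes : List (List String)), Dom_partition_by_feedback guess possible_codes → Spec_partition_by_feedback guess possible_codes (partition_by_feedback guess possible_codes)

-- ===== LEMMAS AND PROOFS =====

-- A's white-peg loop as structural recursion on the remaining guesses.
def pvW (gr sr : List String) : Int :=
  match gr with
  | [] => 0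
  | g :: t => if g ∈ sr then 1 + pvW t (sr.erase g) else pvW t sr

theorem pv_map_fst_zip : ∀ (g s : List String), (g.zip s).map Prod.fst = g.take (min g.length s.length)
  | [], _ => by simp
  | _ :: _, [] => by simp
  | a :: g, b :: s => by simp [Nat.succ_min_succ, pv_map_fst_zip g s]

theorem pv_map_snd_zip : ∀ (g s : List String), (g.zip s).map Prod.snd = s.take (min g.length s.length)
  | [], _ => by simp
  | _ :: _, [] => by simp
  | a :: g, b :: s => by simp [Nat.succ_min_succ, pv_map_snd_zip g s]

theorem pv_foldA (p : List (String × String)) (b : Int) (gr sr : List String) :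
    p.foldl
      (fun acc gs =>
        if gs.1 = gs.2 then (acc.1 + 1, acc.2.1, acc.2.2)
        else (acc.1, acc.2.1 ++ [gs.1], acc.2.2 ++ [gs.2])) (b, gr, sr)
    = (b + (p.countP (fun gs => decide (gs.1 = gs.2)) : Int),
       gr ++ (p.filter (fun gs => !decide (gs.1 = gs.2))).map Prod.fst,
       sr ++ (p.filter (fun gs => !decide (gs.1 = gs.2))).map Prod.snd) := by
  induction p generalizing b gr sr with
  | nil => simp
  | cons hd t ih =>
    by_cases h : hd.1 = hd.2 <;>
      simp [h, ih, add_assoc, add_comm (1 : Int)]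

theorem pv_foldW : ∀ (gr sr : List String) (w : Int),
    (gr.foldl
      (fun acc g =>
        if g ∈ acc.2 then (acc.1 + 1, (PySem.List.remove? acc.2 g).getD acc.2)
        else acc) (w, sr)).1 = w + pvW gr sr
  | [], sr, w => by simp [pvW]
  | g :: t, sr, w => by
    by_cases h : g ∈ sr
    · simp [h, pvW, PySem.List.remove?_eq_some_erase sr g h, pv_foldW t (sr.erase g) (w + 1), add_assoc]
    · simp [h, pvW, pv_foldW t sr w]

theorem pvW_card : ∀ (gr sr : List String),
    pvW gr sr = (Multiset.card ((gr : Multiset String) ∩ (sr : Multiset String)) : Int)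
  | [], sr => by simp [pvW]
  | g :: t, sr => by
    by_cases h : g ∈ sr
    · have h' : g ∈ (sr : Multiset String) := by simpa using h
      rw [pvW, if_pos h, pvW_card t (sr.erase g)]
      rw [show ((g :: t : List String) : Multiset String) = g ::ₘ (t : Multiset String) from rfl]
      rw [Multiset.cons_inter_of_pos _ h', Multiset.card_cons, ← Multiset.coe_erase]
      push_cast
      ring
    · have h' : g ∉ (sr : Multiset String) := by simpa using h
      rw [pvW, if_neg h, pvW_card t sr]
      rw [show ((g :: t : List String) : Multiset String) = g ::ₘ (t : Multiset String) from rfl]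
      rw [Multiset.cons_inter_of_neg _ h']

theorem pv_add_inter_add (M x y : Multiset String) : (M + x) ∩ (M + y) = M + x ∩ y := by
  refine Multiset.ext.mpr fun a => ?_
  simp [Multiset.count_inter]

theorem pv_sum_cast (l : List String) (f : String → Nat) :
    (l.map (fun c => ((f c : Nat) : Int))).sum = ((l.map f).sum : Int) := by
  induction l with
  | nil => simp
  | cons a t ih => simp [ih]

-- sum over the distinct colours of min(count,count) = card of the multiset intersection
theorem pv_sum_min_counts (G S : List String) :
    ((PySem.Set.ofList G).map (fun c => min (G.count c) (S.count c))).sum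
      = Multiset.card ((G : Multiset String) ∩ (S : Multiset String)) := by
  have hnd : (PySem.Set.ofList G).Nodup := PySem.Set.nodup_ofList G
  rw [← List.sum_toFinset _ hnd]
  have htf : (PySem.Set.ofList G).toFinset = G.toFinset := by
    ext x; simp [PySem.Set.mem_ofList]
  rw [htf, ← Multiset.toFinset_sum_count_eq]
  have hsub : ((G : Multiset String) ∩ (S : Multiset String)).toFinset ⊆ G.toFinset := by
    intro x hx
    rw [Multiset.mem_toFinset] at hx
    have := Multiset.subset_of_le (Multiset.inter_le_left (s := (G : Multiset String)) (t := (S : Multiset String))) hx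
    simpa [List.mem_toFinset] using this
  rw [Finset.sum_subset hsub (fun x _ hx => Multiset.count_eq_zero.mpr
        (fun hm => hx (Multiset.mem_toFinset.mpr hm)))]
  refine Finset.sum_congr rfl fun x _ => ?_
  simp

theorem pv_feedback_eq (g s : List String) : pvCalcA g s = pvFeedbackB g s := by
  classical
  set p := g.zip s with hp
  set eqb : String × String → Bool := fun gs => decide (gs.1 = gs.2) with heqb
  set m := p.filter eqb with hm
  set u := p.filter (fun gs => !eqb gs) with hu
  set gr := u.map Prod.fst with hgr
  set sr := u.map Prod.snd with hsr
  -- the two zipped prefixes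
  have hG : g.take (min g.length s.length) = p.map Prod.fst := (pv_map_fst_zip g s).symm
  have hS : s.take (min g.length s.length) = p.map Prod.snd := (pv_map_snd_zip g s).symm
  -- A's value
  have hA : pvCalcA g s = ((p.countP eqb : Int), pvW gr sr) := by
    show (_ : Int × Int) = _
    unfold pvCalcA
    rw [← hp, pv_foldA]
    simp only [zero_add, List.nil_append]
    rw [pv_foldW]
    simp [heqb, hu, hgr, hsr]
  -- B's black count
  have hblack : ((p.map (fun gs => if gs.1 = gs.2 then (1 : Int) else 0)).sum)
      = (p.countP eqb : Int) := by
    rw [heqb]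
    simpa using PySem.List.sum_map_ite_one_zero (fun gs : String × String => decide (gs.1 = gs.2)) p
  -- B's counting loops are counters
  have hcnt : ∀ (l : List String),
      l.foldl (fun (d : PySem.Dict String Int) x => d.insert x (d.getD x 0 + 1)) PySem.Dict.empty
        = PySem.Dict.counter l := fun l => PySem.Dict.foldl_insert_getD_add_one_eq_counter l
  -- B's total
  have htot : ((PySem.Dict.counter (p.map Prod.fst)).items.map
        (fun ck => min ck.2 ((PySem.Dict.counter (p.map Prod.snd)).getD ck.1 0))).sum
      = (Multiset.card (((p.map Prod.fst) : Multiset String) ∩ ((p.map Prod.snd) : Multiset String)) : Int) := by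
    rw [PySem.Dict.items_counter, List.map_map]
    have : ((PySem.Set.ofList (p.map Prod.fst)).map
          ((fun ck => min ck.2 ((PySem.Dict.counter (p.map Prod.snd)).getD ck.1 0)) ∘
            (fun k => (k, ((p.map Prod.fst).count k : Int))))).sum
        = ((PySem.Set.ofList (p.map Prod.fst)).map
            (fun c => ((min ((p.map Prod.fst).count c) ((p.map Prod.snd).count c) : Nat) : Int))).sum := by
      refine congrArg _ (List.map_congr_left fun c _ => ?_)
      simp [PySem.Dict.getD_counter, Nat.cast_min]
    rw [this, pv_sum_cast, pv_sum_min_counts]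
  -- splitting the zipped columns along matched / unmatched positions
  have hperm : (m ++ u).Perm p := List.filter_append_perm eqb p
  have hmm : m.map Prod.fst = m.map Prod.snd := by
    refine List.map_congr_left fun a ha => ?_
    have := List.of_mem_filter (by exact ha : a ∈ p.filter eqb)
    simpa [heqb] using this
  have hGsplit : ((p.map Prod.fst : List String) : Multiset String)
      = ((m.map Prod.fst : List String) : Multiset String) + (gr : Multiset String) := by
    have : ((m ++ u).map Prod.fst).Perm (p.map Prod.fst) := hperm.map Prod.fst
    rw [← Multiset.coe_eq_coe.mpr this]
    simp [hgr]
  have hSsplit : ((p.map Prod.snd : List String) : Multiset String)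
      = ((m.map Prod.fst : List String) : Multiset String) + (sr : Multiset String) := by
    have : ((m ++ u).map Prod.snd).Perm (p.map Prod.snd) := hperm.map Prod.snd
    rw [← Multiset.coe_eq_coe.mpr this]
    simp [hsr, hmm]
  have hcard : Multiset.card (((p.map Prod.fst) : Multiset String) ∩ ((p.map Prod.snd) : Multiset String))
      = p.countP eqb + Multiset.card ((gr : Multiset String) ∩ (sr : Multiset String)) := by
    rw [hGsplit, hSsplit, pv_add_inter_add, Multiset.card_add]
    congr 1
    simp [hm, List.countP_eq_length_filter]
  -- assemble B
  have hB : pvFeedbackB g s = ((p.countP eqb : Int),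
      (Multiset.card ((gr : Multiset String) ∩ (sr : Multiset String)) : Int)) := by
    show pvFeedbackB g s = _
    simp only [pvFeedbackB]
    rw [hG, hS, hcnt, hcnt, ← hp, hblack, htot, hcard]
    rw [Prod.mk.injEq]
    refine ⟨rfl, by push_cast; ring⟩
  rw [hA, hB, pvW_card]

-- ===== VERDICT (by name: the statement is the Claim_ definition above) =====
theorem partition_by_feedback_spec : Claim_equal_partition_by_feedback := by
  intro guess possible_codes _
  unfold Spec_partition_by_feedback partition_by_feedback partition_by_feedback_alt
  have hstep : possible_codes.foldl
      (fun (d : PySem.Dict (Int × Int) (List (List String))) code =>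
        let fb := pvCalcA guess code
        let d1 := if d.contains fb = false then d.insert fb [] else d
        d1.modify fb [] (· ++ [code])) PySem.Dict.empty
      = possible_codes.foldl
      (fun (d : PySem.Dict (Int × Int) (List (List String))) code =>
        let fb := pvFeedbackB guess code
        (d.setdefault fb []).modify fb [] (· ++ [code])) PySem.Dict.empty := by
    refine PySem.List.foldl_congr_mem _ _ _ _ fun d code _ => ?_
    simp only [← pv_feedback_eq guess code]
    by_cases hc : d.contains (pvCalcA guess code)
    · simp [hc, PySem.Dict.setdefault_of_contains _ _ hc]
    · simp only [Bool.not_eq_true] at hc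
      simp [hc, PySem.Dict.setdefault_of_not_contains _ _ hc]
  rw [hstep]
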